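-- pv_equiv track=rewrite | github.com/Jesuzum/devgit | compiladores/p0.py | extraer_variables
-- ===== SOURCE A (Python) =====
-- def extraer_variables(lineas):
--     variables = []
--     dentro_de_main = False
--
--     for linea in lineas:
--         linea = linea.strip()
--
--         if "main()" in linea:
--             dentro_de_main = True
--             continue
--
--         if dentro_de_main:
--             if linea == "}":
--                 break
--             if linea:
--                 variables.append(linea)
--
--     return variables
-- ===== SOURCE B (Python) =====
-- def extraer_variables(lineas):
--     s = [l.strip() for l in lineas]
--     i = next((k for k, l in enumerate(s) if "main()" in l), None)
--     if i is None:
--         return []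
--     body = s[i + 1:]
--     if "}" in body:
--         body = body[:body.index("}")]
--     return [l for l in body if l and "main()" not in l]
-- ===== Notes on version B (the rewrite author's own statement) =====
-- stated objective: alternative
-- what changed: Replaces the dentro_de_main boolean state machine (flag + continue + break inside one loop) with a slice pipeline: strip all lines, locate the first 'main()' marker, slice the tail, truncate at the first '}', then filter non-empty lines not containing 'main()'.
import Mathlib
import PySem

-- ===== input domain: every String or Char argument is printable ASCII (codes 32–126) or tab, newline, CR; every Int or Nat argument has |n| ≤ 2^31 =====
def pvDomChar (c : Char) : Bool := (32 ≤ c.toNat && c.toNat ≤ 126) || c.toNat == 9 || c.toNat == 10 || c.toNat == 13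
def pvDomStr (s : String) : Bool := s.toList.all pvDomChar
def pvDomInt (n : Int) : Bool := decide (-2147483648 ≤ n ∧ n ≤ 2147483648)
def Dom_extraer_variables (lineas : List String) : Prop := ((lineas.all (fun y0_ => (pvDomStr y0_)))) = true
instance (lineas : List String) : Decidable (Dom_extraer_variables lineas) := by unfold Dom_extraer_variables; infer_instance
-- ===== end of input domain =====

-- B replaces A's dentro_de_main flag loop with a slice pipeline (strip, find marker, slice, truncate at "}", filter); objective: alternative decomposition, same cost.
-- ===== PORT A =====
-- A: one loop with a dentro_de_main flag; `break` is modelled by returning the accumulator.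
def extraerA_loop : List String → Bool → List String → List String
  | [], _, vars => vars
  | l :: rest, dentro, vars =>
    let s := PySem.Str.strip l
    if PySem.Str.isIn "main()" s then extraerA_loop rest true vars
    else if dentro then
      if s = "}" then vars
      else if s ≠ "" then extraerA_loop rest dentro (vars ++ [s])
      else extraerA_loop rest dentro vars
    else extraerA_loop rest dentro vars

def extraer_variables (lineas : List String) : List String :=
  extraerA_loop lineas false []

-- ===== PORT B =====
-- B: strip all lines, find the first 'main()' marker, slice the tail, truncate at '}',
-- then filter non-empty lines not containing 'main()'.
def extraer_variables_alt (lineas : List String) : List String :=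
  let s := lineas.map PySem.Str.strip
  match s.findIdx? (fun l => PySem.Str.isIn "main()" l) with
  | none => []
  | some i =>
    let body := s.drop (i + 1)   -- s[i+1:] with a nonnegative in-range start is List.drop
    let body2 := if body.contains "}" then
        body.take ((PySem.List.index? body "}").getD 0)   -- body[:body.index("}")]
      else body
    body2.filter (fun l => !(l == "") && !(PySem.Str.isIn "main()" l))

-- ===== PRECONDITION & SPEC =====
def Spec_extraer_variables (lineas : List String) (out : List String) : Prop := out = extraer_variables_alt lineas
instance (lineas : List String) (out : List String) : Decidable (Spec_extraer_variables lineas out) := by unfold Spec_extraer_variables; infer_instance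

-- ===== CLAIM (what is proved, stated in full; the proofs are below) =====
def Claim_equal_extraer_variables : Prop := ∀ (lineas : List String), Dom_extraer_variables lineas → Spec_extraer_variables lineas (extraer_variables lineas)

-- ===== LEMMAS AND PROOFS =====
-- the body of A's loop once the flag is set, on already-stripped lines
def pvInner : List String → List String
  | [] => []
  | s :: t =>
    if PySem.Str.isIn "main()" s then pvInner t
    else if s = "}" then []
    else if s ≠ "" then s :: pvInner t
    else pvInner t

theorem extraerA_loop_true (rest : List String) :
    ∀ vars, extraerA_loop rest true vars = vars ++ pvInner (rest.map PySem.Str.strip) := by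
  induction rest with
  | nil => intro vars; simp [extraerA_loop, pvInner]
  | cons l t ih =>
    intro vars
    simp only [extraerA_loop, List.map_cons, pvInner]
    split_ifs with h h2 h3
    · exact ih vars
    · simp
    · rw [ih]; simp
    · exact ih vars

theorem pvInner_eq (t : List String) :
    pvInner t = (t.takeWhile (fun s => !(s == "}"))).filter
      (fun l => !(l == "") && !(PySem.Str.isIn "main()" l)) := by
  induction t with
  | nil => simp [pvInner]
  | cons s t ih =>
    rw [List.takeWhile_cons]
    simp only [pvInner]
    by_cases h : PySem.Str.isIn "main()" s = true
    · have hne : s ≠ "}" := fun he => by subst he; exact absurd h (by decide)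
      simp at h
      simp [h, hne, List.filter_cons, ih]
    · simp at h
      by_cases h2 : s = "}"
      · simp [h2]
        intro hx
        exact absurd hx (by decide)
      · by_cases h3 : s = ""
        · simp [h, h2, h3, List.filter_cons, ih]
        · simp [h, h2, h3, List.filter_cons, ih]

theorem truncate_eq (body : List String) :
    (if body.contains "}" then
        body.take ((PySem.List.index? body "}").getD 0)
      else body) = body.takeWhile (fun s => !(s == "}")) := by
  induction body with
  | nil => simp
  | cons s t ih =>
    by_cases h : s = "}"
    · subst h
      simp [PySem.List.index?, List.idxOf?_cons]
    · have hidx : PySem.List.index? (s :: t) "}" = (PySem.List.index? t "}").map (· + 1) := by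
        simp [PySem.List.index?, List.idxOf?_cons, h]
      by_cases hc : t.contains "}" = true
      · rcases hj : PySem.List.index? t "}" with _ | j
        · exfalso
          simp only [PySem.List.index?, List.idxOf?_eq_none_iff] at hj
          exact hj (by simpa using hc)
        · simp only [hc, if_true] at ih
          rw [hj] at ih
          have hm : "}" ∈ t := by simpa using hc
          simp only [PySem.List.index?] at hj
          simp only [PySem.List.index?, List.contains_cons, List.idxOf?_cons]
          rw [if_pos (by simp [hm]), if_neg (by simp [h]), hj]
          simp only [Option.map_some, Option.getD_some, List.take_succ_cons,
            List.takeWhile_cons]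
          rw [if_pos (by simpa using h)]
          simpa using ih
      · simp only [hc, Bool.false_eq_true, if_false] at ih
        have hm : "}" ∉ t := by simpa using hc
        simp only [List.contains_cons]
        rw [if_neg (by simp [hm, Ne.symm h]), List.takeWhile_cons, if_pos (by simpa using h)]
        exact congrArg (s :: ·) ih

theorem main_eq (lineas : List String) :
    extraer_variables lineas = extraer_variables_alt lineas := by
  induction lineas with
  | nil => simp [extraer_variables, extraerA_loop, extraer_variables_alt]
  | cons l rest ih =>
    by_cases h : PySem.Str.isIn "main()" (PySem.Str.strip l) = true
    · show extraerA_loop (l :: rest) false [] = _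
      simp only [extraerA_loop, h, if_true]
      rw [extraerA_loop_true]
      simp only [extraer_variables_alt, List.map_cons, List.findIdx?_cons, h, if_true,
        List.drop_succ_cons, List.drop_zero, List.nil_append]
      rw [truncate_eq, pvInner_eq]
    · show extraerA_loop (l :: rest) false [] = _
      have hA : extraerA_loop (l :: rest) false [] = extraerA_loop rest false [] := by
        simp only [extraerA_loop]
        rw [if_neg h]
        simp only [Bool.false_eq_true, if_false]
      have hB : extraer_variables_alt (l :: rest) = extraer_variables_alt rest := by
        simp only [extraer_variables_alt, List.map_cons, List.findIdx?_cons, h,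
          Bool.false_eq_true, if_false]
        cases hf : List.findIdx? (fun l => PySem.Str.isIn "main()" l) (rest.map PySem.Str.strip) with
        | none => simp
        | some i => simp [List.drop_succ_cons]
      rw [hA, hB]; exact ih

-- ===== VERDICT (by name: the statement is the Claim_ definition above) =====
theorem extraer_variables_spec : Claim_equal_extraer_variables := by
  intro lineas _
  unfold Spec_extraer_variables
  exact main_eq lineas
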